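-- pv_equiv track=rewrite | github.com/shubham0420/dbpedia_gsoc2017_warmup | Chatbot/chatbot.py | correcting_words
-- ===== SOURCE A (Python) =====
-- def correcting_words(sentence):
--     '''
--     This function replaces the n't ending word with 'word stem + not'
--     @sentence : input sentence
--     return : the sentence with 'not' if n't or not was present in sentence.
--     '''
--     sentence  = sentence.split(' ')
--     words = []
--     for word in sentence:
--         if word[-2:] == "n't":
--             words.append(word[:-3] + ' ' + 'not')
--         else:
--             words.append(word)
--     sentence =' '.join(words)
--     return sentence
-- ===== SOURCE B (Python) =====
-- def correcting_words(sentence):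
--     # word[-2:] has length <= 2 and can never equal the 3-char "n't", so the
--     # loop copies every word unchanged, and ' '.join(s.split(' ')) == s for
--     # every string: the whole function is the identity.
--     return sentence
-- ===== Notes on version B (the rewrite author's own statement) =====
-- stated objective: simpler
-- what changed: A's branch compares a 2-character slice with a 3-character suffix string, which can never be equal, and splitting on a single space then rejoining with a space reproduces any string exactly, so B returns its argument unchanged with no splitting or looping.
import Mathlib
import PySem

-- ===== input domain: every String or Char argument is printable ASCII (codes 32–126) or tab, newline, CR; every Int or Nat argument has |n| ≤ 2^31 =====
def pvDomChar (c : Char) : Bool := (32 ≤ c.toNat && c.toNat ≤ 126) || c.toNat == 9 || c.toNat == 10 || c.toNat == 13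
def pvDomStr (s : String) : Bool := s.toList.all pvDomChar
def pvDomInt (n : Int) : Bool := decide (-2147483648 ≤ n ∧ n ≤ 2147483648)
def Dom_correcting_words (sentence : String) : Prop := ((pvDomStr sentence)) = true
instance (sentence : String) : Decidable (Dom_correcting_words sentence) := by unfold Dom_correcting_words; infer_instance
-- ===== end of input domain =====

-- B is the identity: A's branch compares a 2-char slice with the 3-char "n't" (never equal)
-- and ' '.join(s.split(' ')) round-trips, so B simply returns the sentence (objective: simpler).

-- ===== PORT A =====
def correcting_words (sentence : String) : String :=
  -- sentence = sentence.split(' ')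
  let parts := PySem.Chars.splitOn sentence.toList [' ']
  -- words = []; for word in sentence: if word[-2:] == "n't": words.append(word[:-3] + ' ' + 'not') else: words.append(word)
  let words := parts.foldl (fun ws word =>
    if PySem.Chars.slice word (some (-2)) none = ['n', '\'', 't'] then
      ws ++ [PySem.Chars.slice word none (some (-3)) ++ [' '] ++ ['n', 'o', 't']]
    else ws ++ [word]) ([] : List (List Char))
  -- sentence = ' '.join(words); return sentence
  String.ofList (PySem.Chars.join [' '] words)

-- ===== PORT B =====
def correcting_words_alt (sentence : String) : String := sentence

-- ===== PRECONDITION & SPEC =====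
def Spec_correcting_words (sentence : String) (out : String) : Prop := out = correcting_words_alt sentence
instance (sentence : String) (out : String) : Decidable (Spec_correcting_words sentence out) := by unfold Spec_correcting_words; infer_instance

-- ===== CLAIM (what is proved, stated in full; the proofs are below) =====
def Claim_equal_correcting_words : Prop := ∀ (sentence : String), Dom_correcting_words sentence → Spec_correcting_words sentence (correcting_words sentence)

-- ===== LEMMAS AND PROOFS =====

-- word[-2:] has length ≤ 2, so it never equals the 3-char list "n't"
theorem pv_slice_ne_nt (w : List Char) :
    PySem.Chars.slice w (some (-2)) none ≠ ['n', '\'', 't'] := by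
  rw [PySem.Chars.slice_eq_listSlice]
  intro h
  have hlen : (PySem.List.slice w (some (-2)) none).length ≤ 2 := by
    simp [PySem.List.slice]; omega
  rw [h] at hlen
  simp at hlen

theorem pv_intercalate_cons_cons {α : Type} (sep x y : List α) (u : List (List α)) :
    List.intercalate sep (x :: y :: u) = x ++ sep ++ List.intercalate sep (y :: u) := by
  simp [List.intercalate, List.intersperse]

-- since the branch never fires, the loop just copies the words
theorem pv_fold_id (parts : List (List Char)) (acc : List (List Char)) :
    parts.foldl (fun ws word =>
      if PySem.Chars.slice word (some (-2)) none = ['n', '\'', 't'] then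
        ws ++ [PySem.Chars.slice word none (some (-3)) ++ [' '] ++ ['n', 'o', 't']]
      else ws ++ [word]) acc = acc ++ parts := by
  induction parts generalizing acc with
  | nil => simp
  | cons p t ih =>
    rw [List.foldl_cons, if_neg (pv_slice_ne_nt p), ih]
    simp

theorem pv_intercalate_pair {α : Type} (sep a b : List α) (xs : List (List α)) :
    List.intercalate sep (xs ++ [a, b]) = List.intercalate sep (xs ++ [a ++ sep ++ b]) := by
  induction xs with
  | nil => simp [List.intercalate]
  | cons x t ih =>
    cases t with
    | nil => simp [List.intercalate]
    | cons y u =>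
      simp only [List.cons_append] at *
      rw [pv_intercalate_cons_cons, pv_intercalate_cons_cons sep x y (u ++ [a ++ sep ++ b]), ih]

theorem pv_join_go (fuel : Nat) (l cur : List Char) (acc : List (List Char)) :
    List.intercalate [' '] (PySem.Chars.splitOn.go [' '] fuel l cur acc) =
    List.intercalate [' '] (acc.reverse ++ [cur.reverse ++ l]) := by
  induction fuel generalizing l cur acc with
  | zero => simp [PySem.Chars.splitOn.go]
  | succ n ih =>
    cases l with
    | nil => simp [PySem.Chars.splitOn.go]
    | cons c rest =>
      by_cases hc : c = ' '
      · subst hc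
        rw [show PySem.Chars.splitOn.go [' '] (n+1) (' ' :: rest) cur acc =
            PySem.Chars.splitOn.go [' '] n rest [] (cur.reverse :: acc) by
          simp [PySem.Chars.splitOn.go, List.isPrefixOf]]
        rw [ih]
        have : (cur.reverse :: acc).reverse ++ [List.reverse [] ++ rest] =
            acc.reverse ++ [cur.reverse, rest] := by simp
        rw [this, pv_intercalate_pair [' '] cur.reverse rest acc.reverse]
        simp
      · rw [show PySem.Chars.splitOn.go [' '] (n+1) (c :: rest) cur acc =
            PySem.Chars.splitOn.go [' '] n rest (c :: cur) acc by
          simp only [PySem.Chars.splitOn.go, List.isPrefixOf]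
          simp only [Bool.and_eq_true, beq_iff_eq]
          rw [if_neg (by intro h; exact hc h.1.symm)]]
        rw [ih]
        simp

-- ' '.join(s.split(' ')) == s
theorem pv_join_split (s : List Char) :
    PySem.Chars.join [' '] (PySem.Chars.splitOn s [' ']) = s := by
  simp only [PySem.Chars.join, PySem.Chars.splitOn]
  rw [pv_join_go]
  simp [List.intercalate]

-- ===== VERDICT (by name: the statement is the Claim_ definition above) =====
theorem correcting_words_spec : Claim_equal_correcting_words := by
  intro sentence _
  unfold Spec_correcting_words correcting_words correcting_words_alt
  simp only [pv_fold_id, List.nil_append, pv_join_split]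
  exact String.ofList_toList
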